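-- pv_equiv track=rewrite | github.com/alexandraback/datacollection | solutions_5631989306621952_1/Python/Aurelyssee/FirstRoundPartA.py | getCorrectWord
-- ===== SOURCE A (Python) =====
-- def getCorrectWord(stringVal):
--   '''  '''
--   newVal, tmpVal = [], []
--   pivot = ord(stringVal[0])
--   newVal.append(stringVal[0])
--   for i in stringVal[1:]:
--     tmpVal = []
--     if pivot <= ord(i):
--       tmpVal.append(i)
--       tmpVal.extend(newVal)
--       newVal = list(tmpVal)
--       pivot = ord(i)
--     else:
--       newVal.append(i)
--   return "".join(newVal)
-- ===== SOURCE B (Python) =====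
-- def getCorrectWord(stringVal):
--   seed = stringVal[0]
--   rest = stringVal[1:]
--   # stage 1: prefix maximum (over codes) seen strictly before each position of rest
--   pre = []
--   m = ord(seed)
--   for ch in rest:
--     pre.append(m)
--     m = max(m, ord(ch))
--   # stage 2: a char is a running-max record iff its code reaches the prefix max;
--   # records end up (reversed) in front of the seed, the rest after it, in order
--   front = [ch for ch, p in zip(rest, pre) if p <= ord(ch)]
--   back  = [ch for ch, p in zip(rest, pre) if ord(ch) < p]
--   return "".join(reversed(front)) + seed + "".join(back)
-- ===== Notes on version B (the rewrite author's own statement) =====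
-- stated objective: faster
-- what changed: A rebuilds its whole accumulated list on every prepend (quadratic); B instead works in stages: it computes the prefix-maximum code list with one scan, selects front (running-max records) and back chars by filtering against it, and joins reversed(front)+seed+back once.
import Mathlib
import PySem

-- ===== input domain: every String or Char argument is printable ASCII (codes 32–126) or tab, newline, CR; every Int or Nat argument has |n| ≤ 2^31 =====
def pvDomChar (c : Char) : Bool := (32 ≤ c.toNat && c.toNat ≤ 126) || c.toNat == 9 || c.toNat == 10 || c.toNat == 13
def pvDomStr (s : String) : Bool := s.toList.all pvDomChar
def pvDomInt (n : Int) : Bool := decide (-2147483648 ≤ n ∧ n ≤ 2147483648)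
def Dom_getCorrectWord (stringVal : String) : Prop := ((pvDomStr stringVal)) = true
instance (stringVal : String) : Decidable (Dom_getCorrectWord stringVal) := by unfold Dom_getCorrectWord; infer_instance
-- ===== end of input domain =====

-- B replaces A's quadratic rebuild-on-prepend with staged passes (prefix-max scan, then two
-- filters); return-value equivalence on nonempty strings (both raise IndexError on "").

-- ===== PORT A =====
-- A's loop state: (newVal, pivot); the prepend branch builds tmpVal = [i] ++ newVal = i :: newVal.
def getCorrectWord (stringVal : String) : String :=
  match stringVal.toList with
  | [] => ""   -- unreachable under Pre_: Python raises IndexError at stringVal[0]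
  | c :: rest =>
    let r := rest.foldl
      (fun (st : List Char × Int) i =>
        if st.2 ≤ (i.toNat : Int) then (i :: st.1, (i.toNat : Int))
        else (st.1 ++ [i], st.2))
      ([c], (c.toNat : Int))
    String.mk r.1

-- ===== PORT B =====
-- B: stage 1 builds the prefix-maximum list `pre`; stage 2 filters rest against it.
def getCorrectWord_alt (stringVal : String) : String :=
  match stringVal.toList with
  | [] => ""   -- unreachable under Pre_: Python raises IndexError at stringVal[0]
  | seed :: rest =>
    let pre := (rest.foldl
      (fun (st : List Int × Int) ch => (st.1 ++ [st.2], max st.2 (ch.toNat : Int)))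
      ([], (seed.toNat : Int))).1
    let front := ((rest.zip pre).filter (fun p => decide (p.2 ≤ (p.1.toNat : Int)))).map Prod.fst
    let back := ((rest.zip pre).filter (fun p => decide ((p.1.toNat : Int) < p.2))).map Prod.fst
    String.mk (front.reverse ++ seed :: back)

-- ===== PRECONDITION & SPEC =====
-- Pre_ excludes only the empty string, on which the Python A raises IndexError at stringVal[0].
def Pre_getCorrectWord (stringVal : String) : Prop := stringVal ≠ ""
instance (stringVal : String) : Decidable (Pre_getCorrectWord stringVal) := by unfold Pre_getCorrectWord; infer_instance
def pvWitness_getCorrectWord : String := "ba"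

def Spec_getCorrectWord (stringVal : String) (out : String) : Prop := out = getCorrectWord_alt stringVal
instance (stringVal : String) (out : String) : Decidable (Spec_getCorrectWord stringVal out) := by unfold Spec_getCorrectWord; infer_instance

-- ===== CLAIM (what is proved, stated in full; the proofs are below) =====
def Claim_equal_getCorrectWord : Prop := ∀ (stringVal : String), Dom_getCorrectWord stringVal → Pre_getCorrectWord stringVal → Spec_getCorrectWord stringVal (getCorrectWord stringVal)

-- ===== LEMMAS AND PROOFS =====

-- Reference front/back sequences, used only by the proofs to relate the two ports.
def pvFront : List Char → Int → List Char
  | [], _ => []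
  | i :: r, p => if p ≤ (i.toNat : Int) then i :: pvFront r (i.toNat : Int) else pvFront r p

def pvBack : List Char → Int → List Char
  | [], _ => []
  | i :: r, p => if p ≤ (i.toNat : Int) then pvBack r (i.toNat : Int) else i :: pvBack r p

def pvPre : List Char → Int → List Int
  | [], _ => []
  | ch :: r, m => m :: pvPre r (max m (ch.toNat : Int))

theorem a_fold_eq (rest : List Char) (F Bk : List Char) (seed : Char) (p : Int) :
    (rest.foldl
      (fun (st : List Char × Int) i =>
        if st.2 ≤ (i.toNat : Int) then (i :: st.1, (i.toNat : Int))
        else (st.1 ++ [i], st.2))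
      (F.reverse ++ seed :: Bk, p)).1
    = (F ++ pvFront rest p).reverse ++ seed :: (Bk ++ pvBack rest p) := by
  induction rest generalizing F Bk p with
  | nil => simp [pvFront, pvBack]
  | cons i r ih =>
    by_cases h : p ≤ (i.toNat : Int)
    · simpa [pvFront, pvBack, h] using ih (F ++ [i]) Bk (i.toNat : Int)
    · simpa [pvFront, pvBack, h] using ih F (Bk ++ [i]) p

theorem b_pre_eq (rest : List Char) (L : List Int) (m : Int) :
    (rest.foldl
      (fun (st : List Int × Int) ch => (st.1 ++ [st.2], max st.2 (ch.toNat : Int)))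
      (L, m)).1 = L ++ pvPre rest m := by
  induction rest generalizing L m with
  | nil => simp [pvPre]
  | cons ch r ih => simpa [pvPre] using ih (L ++ [m]) (max m (ch.toNat : Int))

theorem b_front_eq (rest : List Char) (m : Int) :
    ((rest.zip (pvPre rest m)).filter (fun p => decide (p.2 ≤ (p.1.toNat : Int)))).map Prod.fst
    = pvFront rest m := by
  induction rest generalizing m with
  | nil => simp [pvPre, pvFront]
  | cons ch r ih =>
    by_cases h : m ≤ ((ch.toNat : Int))
    · have hm : max m ((ch.toNat : Int)) = (ch.toNat : Int) := by omega
      simp [pvPre, pvFront, h, hm, ih]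
    · have hm : max m ((ch.toNat : Int)) = m := by omega
      simp [pvPre, pvFront, h, hm, ih]

theorem b_back_eq (rest : List Char) (m : Int) :
    ((rest.zip (pvPre rest m)).filter (fun p => decide ((p.1.toNat : Int) < p.2))).map Prod.fst
    = pvBack rest m := by
  induction rest generalizing m with
  | nil => simp [pvPre, pvBack]
  | cons ch r ih =>
    by_cases h : m ≤ ((ch.toNat : Int))
    · have hm : max m ((ch.toNat : Int)) = (ch.toNat : Int) := by omega
      simp [pvPre, pvBack, h, hm, ih, not_lt.mpr h]
    · have hm : max m ((ch.toNat : Int)) = m := by omega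
      simp [pvPre, pvBack, h, hm, ih, lt_of_not_ge h]

-- ===== VERDICT (by name: the statement is the Claim_ definition above) =====
theorem getCorrectWord_spec : Claim_equal_getCorrectWord := by
  intro s _ _
  show getCorrectWord s = getCorrectWord_alt s
  unfold getCorrectWord getCorrectWord_alt
  cases h : s.toList with
  | nil => rfl
  | cons c rest =>
    have ha := a_fold_eq rest [] [] c ((c.toNat : Int))
    simp only [List.reverse_nil, List.nil_append] at ha
    simp [ha, b_pre_eq, b_front_eq, b_back_eq]
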